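-- pv_equiv track=rewrite | github.com/Genesis-Embodied-AI/Genesis | genesis/utils/usd/usd_stage.py | _find_common_ancestor_path
-- ===== SOURCE A (Python) =====
-- from typing import List, Set
--
-- def _find_common_ancestor_path(paths: List[str]) -> str:
--     """
--     Find the common ancestor path of a list of prim paths.
--
--     Parameters
--     ----------
--     paths : List[str]
--         List of prim paths.
--
--     Returns
--     -------
--     str
--         The common ancestor path (longest common prefix).
--     """
--     if not paths:
--         return "/"
--
--     # Split paths into components, filtering out empty strings (from leading slash)
--     path_components = [[comp for comp in path.split("/") if comp] for path in paths]
--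
--     # Find the minimum length
--     min_len = min(len(components) for components in path_components)
--
--     # Find common prefix
--     common_components = []
--     for i in range(min_len):
--         if all(components[i] == path_components[0][i] for components in path_components):
--             common_components.append(path_components[0][i])
--         else:
--             break
--
--     if not common_components:
--         return "/"
--
--     return "/" + "/".join(common_components)
-- ===== SOURCE B (Python) =====
-- from typing import List
--
--
-- def _lcp2(a: List[str], b: List[str]) -> List[str]:
--     """Longest common prefix of two component lists."""
--     out = []
--     for x, y in zip(a, b):
--         if x != y:
--             break
--         out.append(x)
--     return out
--
--
-- def _components(path: str) -> List[str]:
--     return [c for c in path.split("/") if c]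
--
--
-- def _find_common_ancestor_path(paths: List[str]) -> str:
--     if not paths:
--         return "/"
--     first, *rest = paths
--     common = _components(first)
--     for p in rest:
--         common = _lcp2(common, _components(p))
--     if not common:
--         return "/"
--     return "/" + "/".join(common)
-- ===== Notes on version B (the rewrite author's own statement) =====
-- stated objective: simpler
-- what changed: Replaced A's column-wise scan (precompute min length, then for each index test all paths with all()) by a running pairwise longest-common-prefix fold: the common prefix shrinks through one binary LCP per path, with no min-length pass and no per-index scan over all paths.
import Mathlib
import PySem

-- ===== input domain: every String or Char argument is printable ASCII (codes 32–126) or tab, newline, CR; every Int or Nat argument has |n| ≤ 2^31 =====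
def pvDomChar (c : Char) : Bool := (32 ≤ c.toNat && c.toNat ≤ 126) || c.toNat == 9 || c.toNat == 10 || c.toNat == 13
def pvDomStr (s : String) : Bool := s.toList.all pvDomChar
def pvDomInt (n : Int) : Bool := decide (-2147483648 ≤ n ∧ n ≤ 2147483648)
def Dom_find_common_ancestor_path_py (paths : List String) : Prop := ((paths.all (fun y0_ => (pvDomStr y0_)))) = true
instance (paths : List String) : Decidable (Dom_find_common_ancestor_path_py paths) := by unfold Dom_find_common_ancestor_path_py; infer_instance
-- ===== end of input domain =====

-- B replaces A's column-wise scan (min length, then per-index all()-test over every path) by a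
-- running pairwise longest-common-prefix fold over the paths; objective: simpler, same cost.

-- ===== PORT A =====
-- path.split("/") with non-empty components kept; the separator "/" is a non-empty literal,
-- so PySem.Str.split? always returns some here (getD [] is never the default).
def pvSplitComps (p : String) : List String :=
  ((PySem.Str.split? p "/").getD []).filter (fun c => c ≠ "")

-- the 'for i in range(min_len): … else: break' loop of A, as forward recursion on the
-- remaining iteration count (fuel = min_len - i); components[i] is always in range
-- (i < min_len ≤ every length), so List.getD with a dummy default is exact here.
def pvALoop (cs : List (List String)) (c0 : List String) (i fuel : Nat) : List String :=
  match fuel with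
  | 0 => []
  | f + 1 =>
    if cs.all (fun c => c.getD i "" = c0.getD i "") then
      c0.getD i "" :: pvALoop cs c0 (i + 1) f
    else []

def find_common_ancestor_path_py (paths : List String) : String :=
  if paths = [] then "/"
  else
    let cs := paths.map pvSplitComps
    -- min(len(components) for components in path_components); cs ≠ [] so min? is some
    let minLen : Int := (PySem.List.min? (cs.map (fun c => (c.length : Int))) (fun y => y)).getD 0
    let c0 := cs.headD []   -- path_components[0]; in range since cs ≠ []
    let common := pvALoop cs c0 0 minLen.toNat
    if common = [] then "/" else "/" ++ PySem.Str.join "/" common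

-- ===== PORT B =====
-- _lcp2: the zip loop with break, structurally
def pvLcp2 : List String → List String → List String
  | x :: xs, y :: ys => if x = y then x :: pvLcp2 xs ys else []
  | _, _ => []

def find_common_ancestor_path_py_alt (paths : List String) : String :=
  match paths with
  | [] => "/"
  | p :: rest =>
    let common := rest.foldl (fun acc q => pvLcp2 acc (pvSplitComps q)) (pvSplitComps p)
    if common = [] then "/" else "/" ++ PySem.Str.join "/" common

-- ===== PRECONDITION & SPEC =====
def Spec_find_common_ancestor_path_py (paths : List String) (out : String) : Prop := out = find_common_ancestor_path_py_alt paths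
instance (paths : List String) (out : String) : Decidable (Spec_find_common_ancestor_path_py paths out) := by unfold Spec_find_common_ancestor_path_py; infer_instance

-- ===== CLAIM (what is proved, stated in full; the proofs are below) =====
def Claim_equal_find_common_ancestor_path_py : Prop := ∀ (paths : List String), Dom_find_common_ancestor_path_py paths → Spec_find_common_ancestor_path_py paths (find_common_ancestor_path_py paths)

-- ===== LEMMAS AND PROOFS =====

-- length of the common prefix of two component lists
def pvK : List String → List String → Nat
  | x :: xs, y :: ys => if x = y then pvK xs ys + 1 else 0
  | _, _ => 0

theorem pvK_le_right : ∀ (a b : List String), pvK a b ≤ b.length := by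
  intro a
  induction a with
  | nil => intro b; cases b <;> simp [pvK]
  | cons x xs ih =>
    intro b
    cases b with
    | nil => simp [pvK]
    | cons y ys =>
      simp only [pvK, List.length_cons]
      split
      · exact Nat.succ_le_succ (ih ys)
      · exact Nat.zero_le _

theorem pvK_agree : ∀ (a b : List String) (i : Nat), i < pvK a b →
    a.getD i "" = b.getD i "" := by
  intro a
  induction a with
  | nil => intro b i h; cases b <;> simp [pvK] at h
  | cons x xs ih =>
    intro b i h
    cases b with
    | nil => simp [pvK] at h
    | cons y ys =>
      simp only [pvK] at h
      split at h
      · cases i with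
        | zero => simpa using ‹x = y›
        | succ j => simpa using ih ys j (by omega)
      · omega

theorem pvK_mismatch : ∀ (a b : List String), pvK a b < a.length → pvK a b < b.length →
    a.getD (pvK a b) "" ≠ b.getD (pvK a b) "" := by
  intro a
  induction a with
  | nil => intro b h _; simp at h
  | cons x xs ih =>
    intro b ha hb
    cases b with
    | nil => simp at hb
    | cons y ys =>
      simp only [pvK, List.length_cons] at *
      split at ha
      · rename_i hxy
        simp only [hxy, if_true] at hb ⊢
        simpa using ih ys (by omega) (by omega)
      · rename_i hxy
        simp only [hxy, if_false] at hb ⊢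
        simpa using hxy

-- pvLcp2 on a truncation of c0 is a truncation of c0
theorem pvLcp2_take : ∀ (a : List String) (k : Nat) (b : List String),
    pvLcp2 (a.take k) b = a.take (min k (pvK a b)) := by
  intro a
  induction a with
  | nil => intro k b; cases b <;> simp [pvLcp2]
  | cons x xs ih =>
    intro k b
    cases k with
    | zero => cases b <;> simp [pvLcp2]
    | succ k =>
      cases b with
      | nil => simp [pvLcp2, pvK]
      | cons y ys =>
        simp only [List.take_succ_cons, pvLcp2, pvK]
        by_cases hxy : x = y
        · have hmin : min (k + 1) (pvK xs ys + 1) = min k (pvK xs ys) + 1 := by omega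
        
          simp [hxy, hmin, ih k ys]
        · simp [hxy]

-- B's fold is a truncation of c0 by a fold of pvK-minima
theorem pvFoldlLcp2 : ∀ (rs : List (List String)) (c0 : List String) (k : Nat),
    rs.foldl pvLcp2 (c0.take k) =
      c0.take (rs.foldl (fun m c => min m (pvK c0 c)) k) := by
  intro rs
  induction rs with
  | nil => intro c0 k; rfl
  | cons r rs ih =>
    intro c0 k
    simp only [List.foldl_cons, pvLcp2_take c0 k r, ih]

-- facts about a foldl of minima
theorem pvFoldMin_le_init (f : List String → Nat) :
    ∀ (rs : List (List String)) (k : Nat), rs.foldl (fun m c => min m (f c)) k ≤ k := by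
  intro rs
  induction rs with
  | nil => intro k; simp
  | cons r rs ih =>
    intro k
    simp only [List.foldl_cons]
    exact le_trans (ih (min k (f r))) (Nat.min_le_left _ _)

theorem pvFoldMin_le_mem (f : List String → Nat) :
    ∀ (rs : List (List String)) (k : Nat) (c : List String), c ∈ rs →
      rs.foldl (fun m c => min m (f c)) k ≤ f c := by
  intro rs
  induction rs with
  | nil => intro k c h; simp at h
  | cons r rs ih =>
    intro k c h
    rcases List.mem_cons.mp h with h | h
    · subst h
      simp only [List.foldl_cons]
      exact le_trans (pvFoldMin_le_init f rs _) (Nat.min_le_right _ _)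
    · exact ih _ c h

theorem pvFoldMin_attained (f : List String → Nat) :
    ∀ (rs : List (List String)) (k : Nat),
      rs.foldl (fun m c => min m (f c)) k = k ∨
      ∃ c ∈ rs, rs.foldl (fun m c => min m (f c)) k = f c := by
  intro rs
  induction rs with
  | nil => intro k; left; rfl
  | cons r rs ih =>
    intro k
    rcases ih (min k (f r)) with h | ⟨c, hc, h⟩
    · simp only [List.foldl_cons]
      rcases Nat.le_total k (f r) with hle | hle
      · left; rw [h]; omega
      · right; exact ⟨r, List.mem_cons_self .., by rw [h]; omega⟩
    · right; exact ⟨c, List.mem_cons_of_mem _ hc, h⟩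

theorem pvFoldMin_mono (f g : List String → Nat) (hfg : ∀ c, f c ≤ g c) :
    ∀ (rs : List (List String)) (k n : Nat), k ≤ n →
      rs.foldl (fun m c => min m (f c)) k ≤ rs.foldl (fun m c => min m (g c)) n := by
  intro rs
  induction rs with
  | nil => intro k n h; simpa using h
  | cons r rs ih =>
    intro k n h
    simp only [List.foldl_cons]
    exact ih _ _ (min_le_min h (hfg r))

-- the Nat fold of minima seen through the Int cast used by A's min(...)
theorem pvFoldMin_int : ∀ (rs : List (List String)) (m : Nat),
    (rs.map (fun c => (c.length : Int))).foldl min (m : Int) =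
      ((rs.foldl (fun m c => min m c.length) m : Nat) : Int) := by
  intro rs
  induction rs with
  | nil => intro m; rfl
  | cons r rs ih =>
    intro m
    simp only [List.map_cons, List.foldl_cons, ← Nat.cast_min, ih]

-- A's loop, run from index i with fuel N - i, yields the tail of c0.take K
theorem pvALoop_eq (c0 : List String) (rs : List (List String)) (K N : Nat)
    (hK : K = rs.foldl (fun m c => min m (pvK c0 c)) c0.length)
    (hN : N = rs.foldl (fun m c => min m c.length) c0.length) :
    ∀ (fuel i : Nat), i + fuel = N → i ≤ K →
      pvALoop (c0 :: rs) c0 i fuel = (c0.take K).drop i := by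
  have hKN : K ≤ N := by
    rw [hK, hN]; exact pvFoldMin_mono _ _ (fun c => pvK_le_right c0 c) rs _ _ le_rfl
  have hK0 : K ≤ c0.length := by rw [hK]; exact pvFoldMin_le_init _ rs _
  have hN0 : N ≤ c0.length := by rw [hN]; exact pvFoldMin_le_init _ rs _
  intro fuel
  induction fuel with
  | zero =>
    intro i hiN hiK
    have hKi : K - i = 0 := by omega
    simp [pvALoop, List.drop_take, hKi]
  | succ f ih =>
    intro i hiN hiK
    rcases Nat.lt_or_ge i K with hlt | hge
    · -- all paths agree at index i
      have hall : ((c0 :: rs).all (fun c => decide (c.getD i "" = c0.getD i ""))) = true := by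
        simp only [List.all_eq_true]
        intro c hc
        rcases List.mem_cons.mp hc with h | h
        · subst h; simp
        · have hik : i < pvK c0 c := by
            refine lt_of_lt_of_le hlt ?_
            rw [hK]; exact pvFoldMin_le_mem _ rs _ c h
          simpa using (pvK_agree c0 c i hik).symm
      have hi0 : i < c0.length := lt_of_lt_of_le hlt hK0
      rw [pvALoop, if_pos hall, ih (i + 1) (by omega) (by omega)]
      have hiK' : i < (c0.take K).length := by
        simp only [List.length_take]; omega
      rw [List.drop_eq_getElem_cons hiK']
      congr 1
      rw [List.getElem_take, List.getD_eq_getElem c0 "" hi0]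
    · -- i = K < N: some path mismatches at i
      have hiK' : i = K := le_antisymm hiK hge
      have hKltN : K < N := by omega
      rcases pvFoldMin_attained (fun c => pvK c0 c) rs c0.length with h | ⟨c, hc, h⟩
      · omega
      · have hKc : pvK c0 c = K := (hK.trans h).symm
        have hcN : N ≤ c.length := by
          rw [hN]; exact pvFoldMin_le_mem _ rs _ c hc
        have hne : c.getD K "" ≠ c0.getD K "" :=
          fun he => pvK_mismatch c0 c (by omega) (by omega) (by rw [hKc]; exact he.symm)
        have hall : ¬ (((c0 :: rs).all (fun c => decide (c.getD i "" = c0.getD i ""))) = true) := by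
          simp only [List.all_eq_true, not_forall]
          exact ⟨c, List.mem_cons_of_mem _ hc, by simpa [hiK'] using hne⟩
        rw [pvALoop, if_neg hall, hiK', List.drop_take]
        simp

-- ===== VERDICT (by name: the statement is the Claim_ definition above) =====
theorem find_common_ancestor_path_py_spec : Claim_equal_find_common_ancestor_path_py := by
  intro paths _
  unfold Spec_find_common_ancestor_path_py
  cases paths with
  | nil => rfl
  | cons p rest =>
    unfold find_common_ancestor_path_py find_common_ancestor_path_py_alt
    simp only [List.map_cons, List.headD_cons, reduceCtorEq, if_false]
    set c0 := pvSplitComps p with hc0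
    set rs := rest.map pvSplitComps with hrs
    set K := rs.foldl (fun m c => min m (pvK c0 c)) c0.length with hKdef
    set N := rs.foldl (fun m c => min m c.length) c0.length with hNdef
    -- the min-length computed by A
    have hmin : (PySem.List.min? (((c0.length : Int)) :: rs.map (fun c => (c.length : Int)))
          (fun y => y)).getD 0 = ((N : Nat) : Int) := by
      rw [PySem.List.min?_id_cons, Option.getD_some, pvFoldMin_int, hNdef]
    -- A's common prefix
    have hA : pvALoop (c0 :: rs) c0 0 (((N : Nat) : Int)).toNat = c0.take K := by
      rw [Int.toNat_natCast]
      simpa using pvALoop_eq c0 rs K N hKdef hNdef N 0 (by omega) (Nat.zero_le _)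
    -- B's common prefix
    have hB : rest.foldl (fun acc q => pvLcp2 acc (pvSplitComps q)) c0 = c0.take K := by
      rw [← List.foldl_map, ← hrs]
      have := pvFoldlLcp2 rs c0 c0.length
      rwa [List.take_length, ← hKdef] at this
    rw [hmin, hA, hB]
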